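-- pv_equiv track=rewrite | github.com/fryymann715/notesapp | lessonlib.py | fill_concepts
-- ===== SOURCE A (Python) =====
-- def get_title(concept):
--     start_location = concept.find('TITLE: ') + 7
--     end_location = concept.find('DESC: ')
--     concept_title = concept[start_location:end_location-1]
--     return concept_title
--
-- def get_desc(concept):
--     start_location = concept.find('DESC: ') + 6
--     end_location = concept.find('TITLE: ', start_location)
--     concept_desc = concept[start_location:end_location]
--     return concept_desc
--
-- def fill_concepts(text, number_of_concepts):
--     counter = 0
--     concept_list = []
--     while counter < number_of_concepts:
--         concept = {}
--         this_concept_start = text.find('TITLE:')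
--         this_concept_end = text.find('TITLE:', this_concept_start + 1)
--         raw_concept = text[this_concept_start:this_concept_end]
--         concept['title'] = get_title(raw_concept)
--         concept['description'] = get_desc(raw_concept)
--         concept_list.append(concept)
--         text = text[this_concept_end:]
--         counter += 1
--     return concept_list
-- ===== SOURCE B (Python) =====
-- def _parse(raw):
--     title_start = raw.find('TITLE: ') + 7
--     title_end = raw.find('DESC: ')
--     desc_start = raw.find('DESC: ') + 6
--     desc_end = raw.find('TITLE: ', desc_start)
--     return {'title': raw[title_start:title_end - 1],
--             'description': raw[desc_start:desc_end]}
--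
-- def fill_concepts(text, number_of_concepts):
--     # one left-to-right pass over the original string: keep a running search
--     # position instead of repeatedly slicing off the consumed prefix
--     concept_list = []
--     start = text.find('TITLE:')
--     for _ in range(number_of_concepts):
--         end = text.find('TITLE:', start + 1)
--         concept_list.append(_parse(text[start:end]))
--         start = end if end != -1 else len(text)
--     return concept_list
-- ===== Notes on version B (the rewrite author's own statement) =====
-- stated objective: alternative
-- what changed: B makes one left-to-right pass keeping a running search position in the original string, instead of A's loop that re-searches and re-slices (copies) the remaining text on every iteration.
import Mathlib
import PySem

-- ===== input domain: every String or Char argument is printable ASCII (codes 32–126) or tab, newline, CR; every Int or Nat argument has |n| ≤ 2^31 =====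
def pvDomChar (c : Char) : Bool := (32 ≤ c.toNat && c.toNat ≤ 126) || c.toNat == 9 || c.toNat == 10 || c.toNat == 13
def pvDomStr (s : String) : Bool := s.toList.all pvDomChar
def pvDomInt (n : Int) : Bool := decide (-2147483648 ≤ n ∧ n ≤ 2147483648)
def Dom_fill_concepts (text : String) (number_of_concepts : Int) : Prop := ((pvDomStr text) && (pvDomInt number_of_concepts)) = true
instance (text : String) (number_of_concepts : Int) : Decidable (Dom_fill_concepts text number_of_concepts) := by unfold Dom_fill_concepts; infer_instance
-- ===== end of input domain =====

-- B makes a single left-to-right pass with a running search position instead of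
-- A's re-search + re-slice of the remaining text each iteration (objective:
-- alternative algorithm that avoids copying the tail, same return value).

-- ===== PORT A =====
def get_title (concept : List Char) : List Char :=
  let start_location : Int := PySem.Chars.find concept "TITLE: ".toList + 7
  let end_location : Int := PySem.Chars.find concept "DESC: ".toList
  PySem.List.slice concept (some start_location) (some (end_location - 1))

def get_desc (concept : List Char) : List Char :=
  let start_location : Int := PySem.Chars.find concept "DESC: ".toList + 6
  let end_location : Int := PySem.Chars.findFrom concept "TITLE: ".toList start_location none
  PySem.List.slice concept (some start_location) (some end_location)

def fillLoopA (t : List Char) : Nat → List (List (String × String))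
  | 0 => []
  | fuel+1 =>
    let s : Int := PySem.Chars.find t "TITLE:".toList
    let e : Int := PySem.Chars.findFrom t "TITLE:".toList (s + 1) none
    let raw := PySem.List.slice t (some s) (some e)
    let concept : List (String × String) :=
      [("title", String.ofList (get_title raw)), ("description", String.ofList (get_desc raw))]
    concept :: fillLoopA (PySem.List.slice t (some e) none) fuel

def fill_concepts (text : String) (number_of_concepts : Int) : List (List (String × String)) :=
  fillLoopA text.toList number_of_concepts.toNat

-- ===== PORT B =====
def parseB (raw : List Char) : List (String × String) :=
  let title_start : Int := PySem.Chars.find raw "TITLE: ".toList + 7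
  let title_end : Int := PySem.Chars.find raw "DESC: ".toList
  let desc_start : Int := PySem.Chars.find raw "DESC: ".toList + 6
  let desc_end : Int := PySem.Chars.findFrom raw "TITLE: ".toList desc_start none
  [("title", String.ofList (PySem.List.slice raw (some title_start) (some (title_end - 1)))),
   ("description", String.ofList (PySem.List.slice raw (some desc_start) (some desc_end)))]

-- Source B's `for _ in range(number_of_concepts)` loop with its running `start`
def fillLoopB (t : List Char) : Int → Nat → List (List (String × String))
  | _, 0 => []
  | start, fuel+1 =>
    let e : Int := PySem.Chars.findFrom t "TITLE:".toList (start + 1) none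
    let concept := parseB (PySem.List.slice t (some start) (some e))
    concept :: fillLoopB t (if e = -1 then (t.length : Int) else e) fuel

def fill_concepts_alt (text : String) (number_of_concepts : Int) : List (List (String × String)) :=
  fillLoopB text.toList (PySem.Chars.find text.toList "TITLE:".toList) number_of_concepts.toNat

-- ===== PRECONDITION & SPEC =====
def Spec_fill_concepts (text : String) (number_of_concepts : Int) (out : List (List (String × String))) : Prop := out = fill_concepts_alt text number_of_concepts
instance (text : String) (number_of_concepts : Int) (out : List (List (String × String))) : Decidable (Spec_fill_concepts text number_of_concepts out) := by unfold Spec_fill_concepts; infer_instance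

-- ===== CLAIM (what is proved, stated in full; the proofs are below) =====
def Claim_equal_fill_concepts : Prop := ∀ (text : String) (number_of_concepts : Int), Dom_fill_concepts text number_of_concepts → Spec_fill_concepts text number_of_concepts (fill_concepts text number_of_concepts)

-- ===== LEMMAS AND PROOFS =====

lemma find_drop_neg (t sub : List Char) (k : Nat) (hk : k ≤ t.length)
    (h : PySem.Chars.findFrom t sub (k : Int) none = -1) :
    PySem.Chars.find (t.drop k) sub = -1 := by
  rw [PySem.Chars.findFrom_natCast t sub k hk] at h
  by_cases hf : PySem.Chars.find (t.drop k) sub = -1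
  · exact hf
  · rw [if_neg hf] at h
    have := PySem.Chars.neg_one_le_find (t.drop k) sub
    omega

lemma find_drop_pos (t sub : List Char) (k : Nat) (p : Int) (hk : k ≤ t.length)
    (h : PySem.Chars.findFrom t sub (k : Int) none = p) (hne : p ≠ -1) :
    PySem.Chars.find (t.drop k) sub = p - k := by
  rw [PySem.Chars.findFrom_natCast t sub k hk] at h
  by_cases hf : PySem.Chars.find (t.drop k) sub = -1
  · rw [if_pos hf] at h; exact absurd h.symm hne
  · rw [if_neg hf] at h; omega

lemma find_eq_zero_of_prefix (l sub : List Char) (h : sub <+: l) :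
    PySem.Chars.find l sub = 0 := by
  have hne : PySem.Chars.find l sub ≠ -1 := by
    rw [PySem.Chars.find_ne_neg_one_iff]; exact h.isInfix
  have hnn : 0 ≤ PySem.Chars.find l sub := by
    have := PySem.Chars.neg_one_le_find l sub; omega
  obtain ⟨hpre, hmin⟩ := PySem.Chars.find_spec hnn
  by_contra hne0
  have hpos : 0 < (PySem.Chars.find l sub).toNat := by omega
  exact hmin 0 hpos (by simpa using h)

-- position bounds extracted from a successful findFrom
lemma findFrom_bounds (t : List Char) (k : Nat) (p : Int) (hk : k ≤ t.length)
    (h : PySem.Chars.findFrom t "TITLE:".toList (k : Int) none = p) (hne : p ≠ -1) :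
    (k : Int) ≤ p ∧ p.toNat + 6 ≤ t.length ∧ "TITLE:".toList <+: t.drop p.toNat := by
  have hspec := PySem.Chars.findFrom_natCast_spec t "TITLE:".toList k hk (h ▸ hne)
  rw [h] at hspec
  obtain ⟨h1, h2, -⟩ := hspec
  have hlen := h2.length_le
  simp only [List.length_drop] at hlen
  have h6 : ("TITLE:".toList).length = 6 := by decide
  refine ⟨h1, by omega, h2⟩

lemma chain_nil_high (t : List Char) (k : Nat) (hk : k ≤ t.length) (h : t.length ≤ k + 5) :
    PySem.Chars.findFrom t "TITLE:".toList (k : Int) none = -1 := by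
  rw [PySem.Chars.findFrom_natCast_eq_neg_one_iff t "TITLE:".toList k hk]
  intro hinf
  have := hinf.length_le
  simp only [List.length_drop] at this
  have h6 : ("TITLE:".toList).length = 6 := by decide
  omega

-- a search starting at or past the end of the list finds nothing (sub nonempty)
lemma findFrom_past (t sub : List Char) (i : Int) (hs : sub ≠ [])
    (h : (t.length : Int) ≤ i) : PySem.Chars.findFrom t sub i none = -1 := by
  simp only [PySem.Chars.findFrom]
  rw [if_neg (by omega : ¬ i < 0)]
  by_cases hlt : (t.length : Int) < i
  · rw [if_pos hlt]
  · rw [if_neg hlt]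
    have hi : i = (t.length : Int) := by omega
    subst hi
    have hdrop : List.drop ((t.length : Int)).toNat (List.take ((t.length : Int)).toNat t) = [] := by
      simp
    rw [hdrop]
    have hfind : PySem.Chars.find [] sub = -1 := by
      rw [PySem.Chars.find_eq_neg_one_iff]
      intro hinf
      exact hs (List.eq_nil_of_infix_nil hinf)
    rw [if_pos hfind]

lemma slice_neg_one_neg_one {α : Type} (l : List α) :
    PySem.List.slice l (some (-1)) (some (-1)) = [] := by
  simp [PySem.List.slice, PySem.List.clampIdx]

lemma slice_neg_one_none {α : Type} (l : List α) :
    PySem.List.slice l (some (-1)) none = l.drop (l.length - 1) := by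
  rcases l with - | ⟨a, l'⟩
  · rfl
  · simp only [PySem.List.slice, PySem.List.clampIdx]
    rw [if_pos (by omega : (-1:Int) < 0),
        if_neg (by simp : ¬ (((a :: l').length : Int) + (-1) < 0))]
    have h1 : (((a :: l').length : Int) + (-1)).toNat = l'.length := by simp
    rw [h1]
    simp only [List.length_cons]
    have h2 : l'.length + 1 - l'.length = 1 := by omega
    rw [h2]
    apply List.take_of_length_le
    simp

lemma slice_nat_neg_one {α : Type} (l : List α) (a : Nat) (h : l ≠ []) :
    PySem.List.slice l (some (a : Int)) (some (-1)) =
      List.take (l.length - 1 - a) (l.drop a) := by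
  have hlen : 1 ≤ l.length := by
    cases l with | nil => exact absurd rfl h | cons x xs => simp
  simp only [PySem.List.slice, PySem.List.clampIdx]
  rw [if_neg (by omega : ¬ ((a : Int) < 0)), if_pos (by omega : ((-1 : Int) < 0)),
      if_neg (by omega : ¬ ((l.length : Int) + (-1) < 0))]
  rcases Nat.le_total a l.length with hle | hgt
  · have hmin : min ((a : Int)).toNat l.length = a := by simp; omega
    rw [hmin]
    congr 1
    omega
  · have hmin : min ((a : Int)).toNat l.length = l.length := by simp; omega
    rw [hmin, List.drop_length]
    have hd : List.drop a l = [] := by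
      apply List.drop_eq_nil_of_le; omega
    rw [hd]
    simp

-- l[len(l):-1] is empty
lemma slice_len_neg_one {α : Type} (l : List α) :
    PySem.List.slice l (some (l.length : Int)) (some (-1)) = [] := by
  rcases l with - | ⟨a, l'⟩
  · rfl
  · rw [slice_nat_neg_one (a :: l') (a :: l').length (by simp)]
    simp

-- A's parse pair and B's parseB are the same computation
lemma parseB_eq_concept (raw : List Char) :
    parseB raw = [("title", String.ofList (get_title raw)), ("description", String.ofList (get_desc raw))] := rfl

-- the loop invariant: A's remaining text t.drop k matches B's running position σ
lemma loop_eq (t : List Char) : ∀ (fuel k : Nat) (σ : Int), k ≤ t.length →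
    ((0 ≤ σ ∧ PySem.Chars.findFrom t "TITLE:".toList (k : Int) none = σ) ∨
     (σ = -1 ∧ k = 0 ∧ PySem.Chars.find t "TITLE:".toList = -1) ∨
     (σ = (t.length : Int) ∧ PySem.Chars.findFrom t "TITLE:".toList (k : Int) none = -1)) →
    fillLoopA (t.drop k) fuel = fillLoopB t σ fuel := by
  intro fuel
  induction fuel with
  | zero => intro k σ hk hinv; rfl
  | succ f ih =>
    intro k σ hk hinv
    rcases hinv with ⟨hσ0, hp⟩ | ⟨hσ, hk0, hfind⟩ | ⟨hσ, hfind⟩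
    · -- σ is the absolute position of the first 'TITLE:' at or after k
      have hne : σ ≠ -1 := by omega
      obtain ⟨h1, h2, h3⟩ := findFrom_bounds t k σ hk hp hne
      have hσnat : ((σ.toNat : Nat) : Int) = σ := by omega
      have hfindA : PySem.Chars.find (t.drop k) "TITLE:".toList = σ - (k : Int) :=
        find_drop_pos t "TITLE:".toList k σ hk hp hne
      simp only [fillLoopA, fillLoopB, hfindA]
      have hc1 : σ - (k : Int) + 1 = ((σ.toNat - k + 1 : Nat) : Int) := by omega
      rw [hc1, PySem.Chars.findFrom_natCast (t.drop k) "TITLE:".toList (σ.toNat - k + 1)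
            (by rw [List.length_drop]; omega),
          List.drop_drop]
      have hc2 : k + (σ.toNat - k + 1) = σ.toNat + 1 := by omega
      rw [hc2]
      have hne_drop : t.drop k ≠ [] := by
        apply List.ne_nil_of_length_pos
        rw [List.length_drop]
        omega
      have htne : t ≠ [] := by
        apply List.ne_nil_of_length_pos
        omega
      have hσ1 : σ + 1 = (((σ.toNat + 1 : Nat)) : Int) := by omega
      rw [hσ1]
      set q := PySem.Chars.findFrom t "TITLE:".toList (((σ.toNat + 1 : Nat)) : Int) none with hq
      by_cases hqne : q = -1
      · -- σ was the last occurrence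
        have hfind2 : PySem.Chars.find (t.drop (σ.toNat + 1)) "TITLE:".toList = -1 :=
          find_drop_neg t "TITLE:".toList (σ.toNat + 1) (by omega) (hq ▸ hqne)
        rw [hfind2, if_pos rfl, hqne, if_pos rfl]
        refine List.cons_eq_cons.mpr ⟨?_, ?_⟩
        · have hraw : PySem.List.slice (t.drop k) (some (σ - (k : Int))) (some (-1)) =
              PySem.List.slice t (some σ) (some (-1)) := by
            have hc3 : σ - (k : Int) = ((σ.toNat - k : Nat) : Int) := by omega
            rw [hc3, slice_nat_neg_one (t.drop k) (σ.toNat - k) hne_drop, ← hσnat,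
                slice_nat_neg_one t σ.toNat htne, List.drop_drop, List.length_drop]
            simp only [Int.toNat_natCast]
            have hc4 : k + (σ.toNat - k) = σ.toNat := by omega
            rw [hc4]
            congr 1
            omega
          rw [hraw, parseB_eq_concept]
        · rw [slice_neg_one_none, List.drop_drop, List.length_drop]
          apply ih (k + (t.length - k - 1)) ((t.length : Nat) : Int) (by omega)
          right; right
          exact ⟨rfl, chain_nil_high t (k + (t.length - k - 1)) (by omega) (by omega)⟩
      · -- there is a further occurrence q
        obtain ⟨g1, g2, g3⟩ := findFrom_bounds t (σ.toNat + 1) q (by omega) hq.symm hqne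
        have hqnat : ((q.toNat : Nat) : Int) = q := by omega
        have hfind2 : PySem.Chars.find (t.drop (σ.toNat + 1)) "TITLE:".toList =
            q - ((σ.toNat + 1 : Nat) : Int) :=
          find_drop_pos t "TITLE:".toList (σ.toNat + 1) q (by omega) hq.symm hqne
        rw [hfind2, if_neg (by omega), if_neg hqne]
        have he : ((σ.toNat - k + 1 : Nat) : Int) + (q - ((σ.toNat + 1 : Nat) : Int)) =
            ((q.toNat - k : Nat) : Int) := by omega
        rw [he]
        refine List.cons_eq_cons.mpr ⟨?_, ?_⟩
        · have hraw : PySem.List.slice (t.drop k) (some (σ - (k : Int)))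
              (some ((q.toNat - k : Nat) : Int)) = PySem.List.slice t (some σ) (some q) := by
            have hc3 : σ - (k : Int) = ((σ.toNat - k : Nat) : Int) := by omega
            rw [hc3, PySem.List.slice_natCast, ← hσnat, ← hqnat, PySem.List.slice_natCast,
                List.drop_drop]
            simp only [Int.toNat_natCast]
            have hc4 : k + (σ.toNat - k) = σ.toNat := by omega
            rw [hc4]
            congr 1
            omega
          rw [hraw, parseB_eq_concept]
        · rw [PySem.List.slice_from_natCast, List.drop_drop]
          have hc7 : k + (q.toNat - k) = q.toNat := by omega
          rw [hc7]
          apply ih q.toNat q (by omega)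
          left
          refine ⟨by omega, ?_⟩
          have hz : PySem.Chars.find (t.drop q.toNat) "TITLE:".toList = 0 :=
            find_eq_zero_of_prefix _ _ g3
          rw [PySem.Chars.findFrom_natCast t "TITLE:".toList q.toNat (by omega), hz]
          norm_num
          omega
    · -- initial call with no occurrence at all: σ = -1
      subst hσ hk0
      simp only [List.drop_zero, fillLoopA, fillLoopB, hfind]
      have h0 : (-1 : Int) + 1 = 0 := by norm_num
      rw [h0, PySem.Chars.findFrom_zero, hfind, if_pos rfl]
      refine List.cons_eq_cons.mpr ⟨(parseB_eq_concept _).symm, ?_⟩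
      rw [slice_neg_one_none]
      exact ih (t.length - 1) ((t.length : Nat) : Int) (by omega)
        (Or.inr (Or.inr ⟨rfl, chain_nil_high t (t.length - 1) (by omega) (by omega)⟩))
    · -- σ = len: the search space is exhausted
      subst hσ
      have hfindA : PySem.Chars.find (t.drop k) "TITLE:".toList = -1 :=
        find_drop_neg t "TITLE:".toList k hk hfind
      simp only [fillLoopA, fillLoopB, hfindA]
      have h0 : (-1 : Int) + 1 = 0 := by norm_num
      rw [h0, PySem.Chars.findFrom_zero, hfindA,
          findFrom_past t "TITLE:".toList ((t.length : Int) + 1) (by decide) (by omega),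
          if_pos rfl, slice_neg_one_neg_one, slice_len_neg_one]
      refine List.cons_eq_cons.mpr ⟨(parseB_eq_concept _).symm, ?_⟩
      rw [slice_neg_one_none, List.drop_drop, List.length_drop]
      exact ih (k + (t.length - k - 1)) ((t.length : Nat) : Int) (by omega)
        (Or.inr (Or.inr ⟨rfl, chain_nil_high t (k + (t.length - k - 1)) (by omega) (by omega)⟩))

-- ===== VERDICT (by name: the statement is the Claim_ definition above) =====
theorem fill_concepts_spec : Claim_equal_fill_concepts := by
  intro text n _
  show fill_concepts text n = fill_concepts_alt text n
  unfold fill_concepts fill_concepts_alt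
  have h := loop_eq text.toList n.toNat 0 (PySem.Chars.find text.toList "TITLE:".toList)
    (Nat.zero_le _) ?_
  · simpa using h
  · by_cases hf : PySem.Chars.find text.toList "TITLE:".toList = -1
    · right; left; exact ⟨hf, rfl, hf⟩
    · left
      have := PySem.Chars.neg_one_le_find text.toList "TITLE:".toList
      refine ⟨by omega, ?_⟩
      simp [PySem.Chars.findFrom_zero]
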